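-- pv_equiv track=rewrite | github.com/gitgab22/mastermind_helper | code.py | conserver_sous_listes_communes_doublons
-- ===== SOURCE A (Python) =====
-- def conserver_sous_listes_communes_doublons(L, c, Current):
--     nouvelle_liste = []
--     for liste in L:
--         elements_communs = 0
--         for element in set(liste):
--             occurences_liste = liste.count(element)
--             occurences_Current = Current.count(element)
--             elements_communs += min(occurences_liste, occurences_Current)
--         if c==elements_communs:
--             nouvelle_liste.append(liste)
--     return nouvelle_liste
-- ===== SOURCE B (Python) =====
-- def conserver_sous_listes_communes_doublons(L, c, Current):
--     base = {}
--     for x in Current: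
--         base[x] = base.get(x, 0) + 1
--     result = []
--     for liste in L:
--         restant = dict(base)
--         elements_communs = 0
--         for element in liste:
--             if restant.get(element, 0) > 0:
--                 elements_communs += 1
--                 restant[element] = restant[element] - 1
--         if c == elements_communs:
--             result.append(liste)
--     return result
-- ===== Notes on version B (the rewrite author's own statement) =====
-- stated objective: faster
-- what changed: Instead of iterating over set(liste) and recomputing liste.count/Current.count per distinct element (each a full scan), B builds a count table of Current once and, per liste, runs a single greedy consuming pass over all elements against a fresh copy of that table.
import Mathlib
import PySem

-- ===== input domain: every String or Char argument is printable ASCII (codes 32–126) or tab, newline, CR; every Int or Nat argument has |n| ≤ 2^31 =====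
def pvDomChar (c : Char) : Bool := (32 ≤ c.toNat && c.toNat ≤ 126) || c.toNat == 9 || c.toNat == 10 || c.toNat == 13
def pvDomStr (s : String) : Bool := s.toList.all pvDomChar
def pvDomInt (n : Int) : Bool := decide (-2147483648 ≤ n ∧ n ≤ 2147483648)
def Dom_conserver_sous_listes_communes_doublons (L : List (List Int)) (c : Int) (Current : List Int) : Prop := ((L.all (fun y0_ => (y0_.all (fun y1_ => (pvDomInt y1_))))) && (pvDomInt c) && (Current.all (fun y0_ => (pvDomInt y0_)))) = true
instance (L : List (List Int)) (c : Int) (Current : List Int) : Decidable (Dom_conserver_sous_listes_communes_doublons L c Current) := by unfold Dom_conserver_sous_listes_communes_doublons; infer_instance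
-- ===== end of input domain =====

-- B replaces A's per-distinct-element count/min scans by one greedy consuming pass per list
-- against a copied count table of Current, built once (objective: faster).

-- ===== PORT A =====
-- the inner loop runs over set(liste); its result is a sum, so it is independent of the
-- (unmodelled) set iteration order — we iterate PySem.Set.ofList liste
def conserver_sous_listes_communes_doublons (L : List (List Int)) (c : Int) (Current : List Int) : List (List Int) :=
  L.foldl (fun nouvelle_liste liste =>
    let elements_communs : Int :=
      (PySem.Set.ofList liste).foldl (fun acc element =>
        acc + min ((PySem.List.count liste element : Int)) ((PySem.List.count Current element : Int))) 0
    if c = elements_communs then nouvelle_liste ++ [liste] else nouvelle_liste) []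

-- ===== PORT B =====
-- greedy step over one list: consume one remaining occurrence if available
def pvGreedyStep (p : PySem.Dict Int Int × Int) (element : Int) : PySem.Dict Int Int × Int :=
  if p.1.getD element 0 > 0 then (p.1.insert element (p.1.getD element 0 - 1), p.2 + 1) else p

def conserver_sous_listes_communes_doublons_alt (L : List (List Int)) (c : Int) (Current : List Int) : List (List Int) :=
  let base : PySem.Dict Int Int :=
    Current.foldl (fun d x => d.insert x (d.getD x 0 + 1)) PySem.Dict.empty
  L.foldl (fun result liste =>
    let st := liste.foldl pvGreedyStep (base, 0)
    if c = st.2 then result ++ [liste] else result) []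

-- ===== PRECONDITION & SPEC =====
def Spec_conserver_sous_listes_communes_doublons (L : List (List Int)) (c : Int) (Current : List Int) (out : List (List Int)) : Prop := out = conserver_sous_listes_communes_doublons_alt L c Current
instance (L : List (List Int)) (c : Int) (Current : List Int) (out : List (List Int)) : Decidable (Spec_conserver_sous_listes_communes_doublons L c Current out) := by unfold Spec_conserver_sous_listes_communes_doublons; infer_instance

-- ===== CLAIM (what is proved, stated in full; the proofs are below) =====
def Claim_equal_conserver_sous_listes_communes_doublons : Prop := ∀ (L : List (List Int)) (c : Int) (Current : List Int), Dom_conserver_sous_listes_communes_doublons L c Current → Spec_conserver_sous_listes_communes_doublons L c Current (conserver_sous_listes_communes_doublons L c Current)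

-- ===== LEMMAS AND PROOFS =====

-- the greedy consuming pass counts, for each distinct element, min(multiplicity, remaining budget)
theorem pvGreedy_eq (xs : List Int) (d : PySem.Dict Int Int) (k : Int)
    (hd : ∀ e : Int, 0 ≤ d.getD e 0) :
    (xs.foldl pvGreedyStep (d, k)).2
      = k + ∑ e ∈ xs.toFinset, min ((List.count e xs : Int)) (d.getD e 0) := by
  induction xs generalizing d k with
  | nil => simp
  | cons x rest ih =>
    simp only [List.foldl_cons]
    by_cases hx : d.getD x 0 > 0
    · have hd' : ∀ e : Int, 0 ≤ (d.insert x (d.getD x 0 - 1)).getD e 0 := by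
        intro e
        rw [PySem.Dict.getD_insert]
        split_ifs with he
        · omega
        · exact hd e
      rw [show pvGreedyStep (d, k) x = (d.insert x (d.getD x 0 - 1), k + 1) by
            simp [pvGreedyStep, hx]]
      rw [ih _ _ hd']
      by_cases hmem : x ∈ rest
      · have hins : (x :: rest).toFinset = rest.toFinset := by
          simp [List.toFinset_cons, Finset.insert_eq_self.mpr (List.mem_toFinset.mpr hmem)]
        rw [hins]
        have hxs : x ∈ rest.toFinset := List.mem_toFinset.mpr hmem
        rw [← Finset.sum_erase_add _ _ hxs, ← Finset.sum_erase_add _ _ hxs]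
        have hcongr : ∑ e ∈ rest.toFinset.erase x,
              min ((List.count e rest : Int)) ((d.insert x (d.getD x 0 - 1)).getD e 0)
            = ∑ e ∈ rest.toFinset.erase x,
              min ((List.count e (x :: rest) : Int)) (d.getD e 0) := by
          apply Finset.sum_congr rfl
          intro e he
          have hne : e ≠ x := (Finset.mem_erase.mp he).1
          rw [PySem.Dict.getD_insert, if_neg hne]
          simp [Ne.symm hne]
        rw [hcongr]
        have hxterm : (1 : Int) + min ((List.count x rest : Int)) (d.getD x 0 - 1)
            = min ((List.count x (x :: rest) : Int)) (d.getD x 0) := by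
          rw [List.count_cons_self]
          push_cast
          omega
        rw [PySem.Dict.getD_insert, if_pos rfl]
        omega
      · have hxs : x ∉ rest.toFinset := fun h => hmem (List.mem_toFinset.mp h)
        rw [List.toFinset_cons, Finset.sum_insert hxs]
        have hcongr : ∑ e ∈ rest.toFinset,
              min ((List.count e rest : Int)) ((d.insert x (d.getD x 0 - 1)).getD e 0)
            = ∑ e ∈ rest.toFinset,
              min ((List.count e (x :: rest) : Int)) (d.getD e 0) := by
          apply Finset.sum_congr rfl
          intro e he
          have hne : e ≠ x := fun h => hxs (h ▸ he)
          rw [PySem.Dict.getD_insert, if_neg hne]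
          simp [Ne.symm hne]
        rw [hcongr]
        have hcnt : List.count x rest = 0 := List.count_eq_zero.mpr hmem
        rw [List.count_cons_self, hcnt]
        have : min ((0 + 1 : Nat) : Int) (d.getD x 0) = 1 := by push_cast; omega
        omega
    · have hzero : d.getD x 0 = 0 := le_antisymm (by omega) (hd x)
      rw [show pvGreedyStep (d, k) x = (d, k) by simp [pvGreedyStep, hx]]
      rw [ih _ _ hd]
      by_cases hmem : x ∈ rest
      · have hins : (x :: rest).toFinset = rest.toFinset := by
          simp [List.toFinset_cons, Finset.insert_eq_self.mpr (List.mem_toFinset.mpr hmem)]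
        rw [hins]
        congr 1
        apply Finset.sum_congr rfl
        intro e he
        by_cases he' : e = x
        · subst he'
          rw [hzero, List.count_cons_self]
          have h1 : min ((List.count e rest : Int)) 0 = 0 := by
            have := Int.natCast_nonneg (List.count e rest); omega
          have h2 : min (((List.count e rest + 1 : Nat)) : Int) 0 = 0 := by
            have := Int.natCast_nonneg (List.count e rest); push_cast; omega
          rw [h1, h2]
        · simp [Ne.symm he']
      · have hxs : x ∉ rest.toFinset := fun h => hmem (List.mem_toFinset.mp h)
        rw [List.toFinset_cons, Finset.sum_insert hxs, hzero]
        have hcongr : ∑ e ∈ rest.toFinset, min ((List.count e (x :: rest) : Int)) (d.getD e 0)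
            = ∑ e ∈ rest.toFinset, min ((List.count e rest : Int)) (d.getD e 0) := by
          apply Finset.sum_congr rfl
          intro e he
          have hne : e ≠ x := fun h => hxs (h ▸ he)
          simp [Ne.symm hne]
        rw [hcongr]
        have : min ((List.count x (x :: rest) : Int)) 0 = 0 := by
          have := Int.natCast_nonneg (List.count x (x :: rest)); omega
        omega

-- A's per-list sum over set(liste) equals the same Finset sum
theorem pvA_inner_eq (liste Current : List Int) :
    (PySem.Set.ofList liste).foldl (fun acc element =>
        acc + min ((PySem.List.count liste element : Int)) ((PySem.List.count Current element : Int))) 0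
      = ∑ e ∈ liste.toFinset, min ((List.count e liste : Int)) ((List.count e Current : Int)) := by
  rw [PySem.List.foldl_add]
  rw [← PySem.List.dedup_eq_ofList]
  have hnd : (PySem.List.dedup liste).Nodup := PySem.List.nodup_dedup liste
  have hfin : (PySem.List.dedup liste).toFinset = liste.toFinset := by
    apply Finset.ext
    intro a
    simp [List.mem_toFinset]
  rw [← hfin, ← List.sum_toFinset _ hnd]
  simp only [PySem.List.count_eq]
  ring

theorem conserver_spec_aux (L : List (List Int)) (c : Int) (Current : List Int) :
    conserver_sous_listes_communes_doublons L c Current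
      = conserver_sous_listes_communes_doublons_alt L c Current := by
  unfold conserver_sous_listes_communes_doublons conserver_sous_listes_communes_doublons_alt
  apply PySem.List.foldl_congr_mem
  intro acc liste _
  have hbase : ∀ e : Int,
      (Current.foldl (fun d x => d.insert x (d.getD x 0 + 1)) PySem.Dict.empty).getD e 0
        = (List.count e Current : Int) := by
    intro e
    rw [PySem.Dict.getD_foldl_insert_add_one]
    simp
  have hd : ∀ e : Int,
      (0 : Int) ≤ (Current.foldl (fun d x => d.insert x (d.getD x 0 + 1)) PySem.Dict.empty).getD e 0 := by
    intro e; rw [hbase e]; exact Int.natCast_nonneg _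
  have hsum := pvGreedy_eq liste
      (Current.foldl (fun d x => d.insert x (d.getD x 0 + 1)) PySem.Dict.empty) 0 hd
  simp only [hbase, zero_add] at hsum
  show (if c = (PySem.Set.ofList liste).foldl (fun acc element =>
        acc + min ((PySem.List.count liste element : Int)) ((PySem.List.count Current element : Int))) 0
      then acc ++ [liste] else acc)
    = (if c = (liste.foldl pvGreedyStep
        (Current.foldl (fun d x => d.insert x (d.getD x 0 + 1)) PySem.Dict.empty, 0)).2
      then acc ++ [liste] else acc)
  rw [pvA_inner_eq, hsum]

-- ===== VERDICT (by name: the statement is the Claim_ definition above) =====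
theorem conserver_sous_listes_communes_doublons_spec : Claim_equal_conserver_sous_listes_communes_doublons := by
  intro L c Current _
  unfold Spec_conserver_sous_listes_communes_doublons
  exact conserver_spec_aux L c Current
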